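-- pv_equiv track=rewrite | github.com/tpmmthomas/secure-data-valuation | experiments/data.py | generate_balanced_distribution
-- ===== SOURCE A (Python) =====
-- def generate_balanced_distribution(num_classes, per_batch):
--     """
--     Create a distribution where each of the `num_classes` gets ~ per_batch/num_classes items.
--     """
--     base = per_batch // num_classes
--     dist = [base] * num_classes
--     leftover = per_batch - sum(dist)
--     i = 0
--     while leftover > 0:
--         dist[i % num_classes] += 1
--         leftover -= 1
--         i += 1
--     return dist
-- ===== SOURCE B (Python) =====
-- def generate_balanced_distribution(num_classes, per_batch):
--     base, r = divmod(per_batch, num_classes)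
--     return [base + 1 if i < r else base for i in range(num_classes)]
-- ===== Notes on version B (the rewrite author's own statement) =====
-- stated objective: simpler
-- what changed: A fills a list with the floored base, recomputes the sum to find the leftover, and patches entries in a while-loop with a running index mod num_classes; B computes (base, r) once with divmod and emits each entry by a closed-form rule (base+1 for the first r indices) in a single pass over range(num_classes).
import Mathlib
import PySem

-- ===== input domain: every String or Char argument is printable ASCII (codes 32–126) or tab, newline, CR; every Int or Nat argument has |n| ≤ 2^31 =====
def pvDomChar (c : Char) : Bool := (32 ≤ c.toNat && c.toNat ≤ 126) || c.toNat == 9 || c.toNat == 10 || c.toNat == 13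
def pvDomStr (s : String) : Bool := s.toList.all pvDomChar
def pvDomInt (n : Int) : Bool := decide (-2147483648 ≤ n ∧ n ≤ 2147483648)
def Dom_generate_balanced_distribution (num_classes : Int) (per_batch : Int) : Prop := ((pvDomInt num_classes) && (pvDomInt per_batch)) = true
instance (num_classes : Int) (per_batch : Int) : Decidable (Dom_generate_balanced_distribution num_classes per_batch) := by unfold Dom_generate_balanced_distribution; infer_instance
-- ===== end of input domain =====

-- B replaces A's fill/recompute-sum/while-patch structure with one divmod and a single
-- closed-form pass over the class indices (objective: simpler).


-- ===== PORT A =====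
-- while leftover > 0: dist[i % num_classes] += 1; leftover -= 1; i += 1
-- leftover drops by exactly 1 per iteration, so the loop runs leftover.toNat times (fuel).
-- dist[j] += 1 is ported with List.set/getD, exact for the in-range indices reached inside
-- Pre_ (out-of-range indexing raises IndexError in Python and is excluded by Pre_).
def pvALoop (num_classes : Int) : Nat → Int → List Int → List Int
  | 0, _, dist => dist
  | m + 1, i, dist =>
      let j := (PySem.Int.mod i num_classes).toNat
      pvALoop num_classes m (i + 1) (dist.set j (dist.getD j 0 + 1))

def generate_balanced_distribution (num_classes : Int) (per_batch : Int) : List Int :=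
  let base := PySem.Int.floordiv per_batch num_classes
  let dist := List.replicate num_classes.toNat base
  let leftover := per_batch - dist.sum
  pvALoop num_classes leftover.toNat 0 dist

-- ===== PORT B =====
def generate_balanced_distribution_alt (num_classes : Int) (per_batch : Int) : List Int :=
  match PySem.Int.divmod? per_batch num_classes with
  | none => []   -- num_classes = 0: Python B raises ZeroDivisionError (outside Pre_)
  | some (base, r) =>
      (PySem.List.pyRange 0 num_classes 1).map (fun i => if i < r then base + 1 else base)

-- ===== PRECONDITION & SPEC =====
-- Pre_ excludes exactly the inputs where A raises: num_classes = 0 (ZeroDivisionError)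
-- and num_classes < 0 with per_batch > 0 (IndexError on the empty dist list).
def Pre_generate_balanced_distribution (num_classes : Int) (per_batch : Int) : Prop :=
  0 < num_classes ∨ (num_classes < 0 ∧ per_batch ≤ 0)
instance (num_classes : Int) (per_batch : Int) : Decidable (Pre_generate_balanced_distribution num_classes per_batch) := by unfold Pre_generate_balanced_distribution; infer_instance

def pvWitness_generate_balanced_distribution : Int × Int := (3, 7)

def Spec_generate_balanced_distribution (num_classes : Int) (per_batch : Int) (out : List Int) : Prop := out = generate_balanced_distribution_alt num_classes per_batch
instance (num_classes : Int) (per_batch : Int) (out : List Int) : Decidable (Spec_generate_balanced_distribution num_classes per_batch out) := by unfold Spec_generate_balanced_distribution; infer_instance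

-- ===== CLAIM (what is proved, stated in full; the proofs are below) =====
def Claim_equal_generate_balanced_distribution : Prop := ∀ (num_classes : Int) (per_batch : Int), Dom_generate_balanced_distribution num_classes per_batch → Pre_generate_balanced_distribution num_classes per_batch → Spec_generate_balanced_distribution num_classes per_batch (generate_balanced_distribution num_classes per_batch)

-- ===== LEMMAS AND PROOFS =====

-- The loop, run m times from running index i on an in-range tail, increments entries i..i+m-1.
lemma pvALoop_eq (n : Int) (hn : 0 < n) :
    ∀ (m i : Nat) (dist : List Int), dist.length = n.toNat → i + m ≤ n.toNat →
      pvALoop n m (i : Int) dist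
        = dist.mapIdx (fun j v => if i ≤ j ∧ j < i + m then v + 1 else v) := by
  intro m
  induction m with
  | zero =>
      intro i dist _ _
      simp only [pvALoop]
      apply List.ext_getElem (by simp)
      intro j h1 h2
      simp only [List.getElem_mapIdx]
      rw [if_neg (by omega)]
  | succ m ih =>
      intro i dist hlen him
      have hi : i < n.toNat := by omega
      have hmod : PySem.Int.mod (i : Int) n = (i : Int) := by
        rw [PySem.Int.mod_eq_emod_of_pos hn]
        exact Int.emod_eq_of_lt (by omega) (by omega)
      have hilen : i < dist.length := by omega
      have hcast : ((i : Int) + 1) = ((i + 1 : Nat) : Int) := by push_cast; ring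
      rw [pvALoop, hmod, hcast, Int.toNat_natCast,
        ih (i + 1) _ (by simpa using hlen) (by omega)]
      apply List.ext_getElem (by simp)
      intro j h1 h2
      simp only [List.getElem_mapIdx, List.getElem_set, List.getD_eq_getElem?_getD,
        List.getElem?_eq_getElem hilen, Option.getD_some]
      by_cases hji : j = i
      · subst hji
        rw [if_neg (by omega), if_pos rfl, if_pos (by omega)]
      · rw [if_neg (by omega : ¬ i = j)]
        split_ifs with h3 h4 h4 <;> first | rfl | omega

theorem generate_balanced_distribution_spec : Claim_equal_generate_balanced_distribution := by
  intro n p _ hpre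
  unfold Spec_generate_balanced_distribution generate_balanced_distribution_alt
  have hA : generate_balanced_distribution n p
      = pvALoop n (p - (List.replicate n.toNat (PySem.Int.floordiv p n)).sum).toNat 0
          (List.replicate n.toNat (PySem.Int.floordiv p n)) := rfl
  rw [hA]
  have hdm : PySem.Int.divmod? p n =
      some (PySem.Int.floordiv p n, PySem.Int.mod p n) := by
    simp [PySem.Int.divmod?, PySem.Int.floordiv, PySem.Int.mod,
      (by rcases hpre with h | ⟨h, _⟩ <;> omega : n ≠ 0)]
  rw [hdm]
  rcases hpre with hn | ⟨hn, hp⟩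
  · -- 0 < n
    have hsum : (List.replicate n.toNat (PySem.Int.floordiv p n)).sum
        = (n.toNat : Int) * PySem.Int.floordiv p n := by
      simp [List.sum_replicate]
    have hnc : ((n.toNat : Int)) = n := by omega
    have hfm := PySem.Int.floordiv_mul_add_mod p n
    have hlef : p - (List.replicate n.toNat (PySem.Int.floordiv p n)).sum
        = PySem.Int.mod p n := by rw [hsum, hnc, mul_comm]; omega
    have hbnd : 0 ≤ PySem.Int.mod p n ∧ PySem.Int.mod p n < n := by
      rw [PySem.Int.mod_eq_emod_of_pos hn]
      exact ⟨Int.emod_nonneg p (by omega), Int.emod_lt_of_pos p hn⟩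
    rw [hlef]
    have hloop := pvALoop_eq n hn (PySem.Int.mod p n).toNat 0
      (List.replicate n.toNat (PySem.Int.floordiv p n)) (by simp) (by omega)
    norm_num at hloop
    rw [hloop, PySem.List.pyRange_one]
    apply List.ext_getElem (by simp)
    intro j h1 h2
    simp only [List.getElem_mapIdx, List.getElem_replicate, List.getElem_map,
      List.getElem_range, zero_add, sub_zero]
  · -- n < 0, p ≤ 0: dist = [], leftover = p ≤ 0, loop runs 0 times; B's range is empty
    have h1 : n.toNat = 0 := by omega
    have h2 : (p - ([] : List Int).sum).toNat = 0 := by simp; omega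
    simp only [h1, List.replicate_zero]
    rw [h2]
    simp [pvALoop, PySem.List.pyRange_one_eq_nil (by omega : n ≤ 0)]
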